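-- pv_equiv track=rewrite | github.com/GiovanniCinel/CodeAdvent | 2024/Day 07/Step 1/solution.py | findOperation
-- ===== SOURCE A (Python) =====
-- def findOperation(result, vec, partial):
--     if partial > result:
--         False
--     if(len(vec) == 1):
--         if(result == partial * vec[0]):
--             return True
--         if(result == partial + vec[0]):
--             return True
--         return False
--
--     mulWay = partial * vec[0]
--     sumWay = partial + vec[0]
--
--     if(findOperation(result, vec[1:], mulWay) or findOperation(result, vec[1:], sumWay)):
--         return True
--     return False
-- ===== SOURCE B (Python) =====
-- def findOperation(result, vec, partial):
--     reach = {partial}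
--     for x in vec[:-1]:
--         reach = {p * x for p in reach} | {p + x for p in reach}
--     last = vec[-1]
--     return any(result == p * last or result == p + last for p in reach)
-- ===== Notes on version B (the rewrite author's own statement) =====
-- stated objective: alternative
-- what changed: Replaces A's binary recursion over the tail with an iterative breadth-first frontier: a set of all reachable accumulated values is grown once per element of vec[:-1], then the target is checked against the last element in one pass; deduplication can shrink the frontier.
import Mathlib
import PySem

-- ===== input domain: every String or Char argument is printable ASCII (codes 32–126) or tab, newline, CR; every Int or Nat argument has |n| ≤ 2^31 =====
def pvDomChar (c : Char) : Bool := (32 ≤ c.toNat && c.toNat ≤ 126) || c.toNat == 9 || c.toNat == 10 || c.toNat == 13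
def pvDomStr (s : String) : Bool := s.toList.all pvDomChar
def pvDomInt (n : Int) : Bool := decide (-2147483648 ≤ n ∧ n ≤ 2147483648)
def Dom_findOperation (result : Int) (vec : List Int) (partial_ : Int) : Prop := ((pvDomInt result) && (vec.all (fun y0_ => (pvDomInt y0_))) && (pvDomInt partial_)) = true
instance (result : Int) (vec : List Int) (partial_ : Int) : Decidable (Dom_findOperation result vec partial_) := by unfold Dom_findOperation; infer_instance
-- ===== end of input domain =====

-- B replaces A's binary recursion with an iterative reachable-value frontier (a set grown once per element); alternative decomposition, same worst-case cost.


-- ===== PORT A =====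
def findOperation (result : Int) (vec : List Int) (partial_ : Int) : Bool :=
  match vec with
  | [] => false  -- Python raises IndexError here (vec[0] on empty list); excluded by Pre_
  | [x] =>
    if result = partial_ * x then true
    else if result = partial_ + x then true
    else false
  | x :: rest =>
    let mulWay := partial_ * x
    let sumWay := partial_ + x
    if findOperation result rest mulWay || findOperation result rest sumWay then true
    else false

-- ===== PORT B =====
-- one frontier step: {p*x for p in reach} | {p+x for p in reach}
def pvStep (reach : PySem.Set Int) (x : Int) : PySem.Set Int :=
  PySem.Set.union (PySem.Set.ofList (reach.map (fun p => p * x))) (reach.map (fun p => p + x))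

def findOperation_alt (result : Int) (vec : List Int) (partial_ : Int) : Bool :=
  let reach := (PySem.List.slice vec none (some (-1))).foldl pvStep (PySem.Set.ofList [partial_])
  match PySem.List.pyGet? vec (-1) with
  | none => false  -- Python raises IndexError here (vec[-1] on empty list); excluded by Pre_
  | some last => reach.any (fun p => result = p * last || result = p + last)

-- ===== PRECONDITION & SPEC =====
-- A (at vec[0]) and B (at vec[-1]) both raise IndexError on the empty list; Pre_ excludes it.
def Pre_findOperation (result : Int) (vec : List Int) (partial_ : Int) : Prop := vec ≠ []
instance (result : Int) (vec : List Int) (partial_ : Int) : Decidable (Pre_findOperation result vec partial_) := by unfold Pre_findOperation; infer_instance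
def pvWitness_findOperation : Int × List Int × Int := (190, [10, 19], 1)

def Spec_findOperation (result : Int) (vec : List Int) (partial_ : Int) (out : Bool) : Prop := out = findOperation_alt result vec partial_
instance (result : Int) (vec : List Int) (partial_ : Int) (out : Bool) : Decidable (Spec_findOperation result vec partial_ out) := by unfold Spec_findOperation; infer_instance

-- ===== CLAIM (what is proved, stated in full; the proofs are below) =====
def Claim_equal_findOperation : Prop := ∀ (result : Int) (vec : List Int) (partial_ : Int), Dom_findOperation result vec partial_ → Pre_findOperation result vec partial_ → Spec_findOperation result vec partial_ (findOperation result vec partial_)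

-- ===== LEMMAS AND PROOFS =====

-- one frontier step preserves the "some element reaches" predicate
theorem pvStep_any (S : List Int) (x : Int) (f : Int → Bool) :
    (pvStep S x).any f = S.any (fun p => f (p * x) || f (p + x)) := by
  rw [Bool.eq_iff_iff]
  simp only [List.any_eq_true, pvStep, PySem.Set.mem_union, PySem.Set.mem_ofList, List.mem_map]
  constructor
  · rintro ⟨q, (⟨p, hp, rfl⟩ | ⟨p, hp, rfl⟩), hf⟩
    · exact ⟨p, hp, by simp [hf]⟩
    · exact ⟨p, hp, by simp [hf]⟩
  · rintro ⟨p, hp, hf⟩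
    rcases Bool.or_eq_true_iff.mp hf with h | h
    · exact ⟨p * x, Or.inl ⟨p, hp, rfl⟩, h⟩
    · exact ⟨p + x, Or.inr ⟨p, hp, rfl⟩, h⟩

-- the frontier loop over vec[:-1] followed by the last-element check computes
-- "some seed value, run through A, succeeds"
theorem pvLoop_any (result : Int) (vec : List Int) (hv : vec ≠ []) :
    ∀ S : List Int,
      ((vec.dropLast.foldl pvStep S).any
        (fun p => result = p * vec.getLast hv || result = p + vec.getLast hv))
        = S.any (fun p => findOperation result vec p) := by
  induction vec with
  | nil => exact absurd rfl hv
  | cons x rest ih =>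
    intro S
    cases rest with
    | nil =>
      rw [show ([x] : List Int).dropLast = [] from rfl, List.foldl_nil]
      congr 1
      funext p
      simp only [findOperation]
      by_cases h1 : result = p * x <;> by_cases h2 : result = p + x <;> simp [h1, h2]
    | cons y t =>
      have hr : (y :: t : List Int) ≠ [] := by simp
      rw [show (x :: y :: t).dropLast = x :: (y :: t).dropLast from rfl,
          List.foldl_cons,
          show (x :: y :: t).getLast hv = (y :: t).getLast hr from rfl,
          ih hr (pvStep S x), pvStep_any]
      congr 1
      funext p
      simp only [findOperation]
      by_cases h : (findOperation result (y :: t) (p * x) || findOperation result (y :: t) (p + x)) = true <;>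
        simp_all

-- ===== VERDICT (by name: the statement is the Claim_ definition above) =====
theorem findOperation_spec : Claim_equal_findOperation := by
  intro result vec partial_ _ hpre
  unfold Spec_findOperation findOperation_alt
  have hv : vec ≠ [] := hpre
  rw [PySem.List.slice_to_neg_one]
  rw [PySem.List.pyGet?_neg_one, List.getLast?_eq_getLast_of_ne_nil hv]
  dsimp only
  rw [pvLoop_any result vec hv (PySem.Set.ofList [partial_])]
  simp [PySem.Set.ofList]
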